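-- pv_equiv track=rewrite | github.com/JakeSaunders1995/comp16321MarkingMid | CW_spell/spellcheck_x83363dr/spellcheck_x83363dr.py | checkWordsInList2
-- ===== SOURCE A (Python) =====
-- def checkWordsInList2(list, list2):
--     numberOfWordsInList2 = 0
--     numberOfWordsNotInList = 0
--     for word in list:
--         if word in list2:
--             numberOfWordsInList2 += 1
--         else:
--             numberOfWordsNotInList += 1
--     return {
--         "numberOfWordsInList2": numberOfWordsInList2,
--         "numberOfWordsNotInList2": numberOfWordsNotInList,
--     }
-- ===== SOURCE B (Python) =====
-- def checkWordsInList2(list, list2):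
--     # Aggregate first: build a frequency table of the words, then test
--     # membership in list2 only ONCE PER DISTINCT WORD and add up the counts.
--     counts = {}
--     for word in list:
--         counts[word] = counts.get(word, 0) + 1
--     present = 0
--     for word, c in counts.items():
--         if word in list2:
--             present += c
--     return {
--         "numberOfWordsInList2": present,
--         "numberOfWordsNotInList2": len(list) - present,
--     }
-- ===== Notes on version B (the rewrite author's own statement) =====
-- stated objective: alternative
-- what changed: B first aggregates list into a frequency dictionary, then scans list2 once per DISTINCT word (adding that word's count) and derives the absent count by subtraction, instead of A's per-word membership test with two counters.
import Mathlib
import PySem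

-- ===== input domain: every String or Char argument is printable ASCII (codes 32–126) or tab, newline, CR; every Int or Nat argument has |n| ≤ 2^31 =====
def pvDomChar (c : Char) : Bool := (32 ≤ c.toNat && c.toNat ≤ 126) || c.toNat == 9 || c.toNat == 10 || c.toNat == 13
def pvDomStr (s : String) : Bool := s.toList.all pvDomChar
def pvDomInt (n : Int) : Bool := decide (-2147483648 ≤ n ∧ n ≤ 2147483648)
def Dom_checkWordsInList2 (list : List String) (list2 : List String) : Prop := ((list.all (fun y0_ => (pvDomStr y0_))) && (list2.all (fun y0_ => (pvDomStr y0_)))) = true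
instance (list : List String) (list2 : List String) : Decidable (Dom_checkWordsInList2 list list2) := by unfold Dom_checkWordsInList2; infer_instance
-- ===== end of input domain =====

-- B aggregates the words into a frequency dict and tests membership in list2
-- once per distinct word, deriving the absent count by subtraction (alternative algorithm).

-- ===== PORT A =====
def checkWordsInList2 (list : List String) (list2 : List String) : List (String × Int) :=
  let p := list.foldl (fun (acc : Int × Int) word =>
      if list2.contains word then (acc.1 + 1, acc.2) else (acc.1, acc.2 + 1)) (0, 0)
  [("numberOfWordsInList2", p.1), ("numberOfWordsNotInList2", p.2)]

-- ===== PORT B =====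
def checkWordsInList2_alt (list : List String) (list2 : List String) : List (String × Int) :=
  let counts : PySem.Dict String Int :=
    list.foldl (fun d word => d.insert word (d.getD word 0 + 1)) PySem.Dict.empty
  let present : Int :=
    counts.items.foldl (fun acc p => if list2.contains p.1 then acc + p.2 else acc) 0
  [("numberOfWordsInList2", present), ("numberOfWordsNotInList2", (list.length : Int) - present)]

-- ===== PRECONDITION & SPEC =====
def Spec_checkWordsInList2 (list : List String) (list2 : List String) (out : List (String × Int)) : Prop := out = checkWordsInList2_alt list list2
instance (list : List String) (list2 : List String) (out : List (String × Int)) : Decidable (Spec_checkWordsInList2 list list2 out) := by unfold Spec_checkWordsInList2; infer_instance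

-- ===== CLAIM =====
def Claim_equal_checkWordsInList2 : Prop := ∀ (list : List String) (list2 : List String), Dom_checkWordsInList2 list list2 → Spec_checkWordsInList2 list list2 (checkWordsInList2 list list2)

-- ===== LEMMAS AND PROOFS =====

-- A's pair fold = (direct count, length - direct count)
theorem cnt_shift (l2 : List String) : ∀ (l : List String) (a : Int),
    l.foldl (fun acc word => if l2.contains word then acc + 1 else acc) a
    = a + l.foldl (fun acc word => if l2.contains word then acc + 1 else acc) 0 := by
  intro l
  induction l with
  | nil => intro a; simp [List.foldl]
  | cons x xs ih =>
    intro a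
    simp only [List.foldl]
    by_cases h : l2.contains x
    · simp only [h, if_true]; rw [ih (a+1), ih (0+1)]; ring
    · simp only [h, Bool.false_eq_true, if_false]; exact ih a

theorem fold_pair_eq (l2 : List String) : ∀ (l : List String) (a b : Int),
    l.foldl (fun (acc : Int × Int) word =>
      if l2.contains word then (acc.1 + 1, acc.2) else (acc.1, acc.2 + 1)) (a, b)
    = (a + l.foldl (fun acc word => if l2.contains word then acc + 1 else acc) 0,
       b + ((l.length : Int) - l.foldl (fun acc word => if l2.contains word then acc + 1 else acc) 0)) := by
  intro l
  induction l with
  | nil => intro a b; simp [List.foldl]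
  | cons x xs ih =>
    intro a b
    simp only [List.foldl]
    by_cases h : l2.contains x
    · simp only [h, if_true]
      rw [ih (a+1) b, cnt_shift l2 xs (0+1)]
      refine Prod.ext ?_ ?_ <;> (simp; try ring)
    · simp only [h, Bool.false_eq_true, if_false]
      rw [ih a (b+1), cnt_shift l2 xs 0]
      refine Prod.ext ?_ ?_ <;> (simp; try ring)

-- direct count fold = countP
theorem cnt_eq_countP (l2 : List String) : ∀ (l : List String),
    l.foldl (fun acc word => if l2.contains word then acc + 1 else acc) 0
    = (l.countP (fun w => l2.contains w) : Int) := by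
  intro l
  induction l with
  | nil => simp [List.foldl]
  | cons x xs ih =>
    simp only [List.foldl, List.countP_cons]
    by_cases h : l2.contains x
    · simp only [h, if_true]
      rw [cnt_shift l2 xs (0+1), ih]
      push_cast; ring
    · simp only [h, Bool.false_eq_true, if_false]
      simpa using ih

-- B's item fold = sum of counts of the ite-selected entries
theorem fold_if_add (l2 : List String) : ∀ (l : List (String × Int)) (init : Int),
    l.foldl (fun acc p => if l2.contains p.1 then acc + p.2 else acc) init
    = init + (l.map (fun p => if l2.contains p.1 then p.2 else 0)).sum := by
  intro l
  induction l with
  | nil => intro init; simp [List.foldl]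
  | cons x xs ih =>
    intro init
    simp only [List.foldl, List.map, List.sum_cons]
    by_cases h : l2.contains x.1
    · simp only [h, if_true]; rw [ih]; ring
    · simp only [h, Bool.false_eq_true, if_false]; rw [ih]; ring

-- helper: a nodup list contributes the single bump at x
theorem sum_single_bump (p : String → Bool) (x : String) : ∀ (s : List String),
    s.Nodup → x ∈ s →
    (s.map (fun k => if p k then (if k = x then (1:Int) else 0) else 0)).sum
      = if p x then 1 else 0 := by
  intro s
  induction s with
  | nil => intro _ hx; simp at hx
  | cons y ys ih =>
    intro hnd hx
    simp only [List.map, List.sum_cons]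
    rcases List.mem_cons.mp hx with rfl | hx'
    · have hyn : x ∉ ys := (List.nodup_cons.mp hnd).1
      have hz : (ys.map (fun k => if p k then (if k = x then (1:Int) else 0) else 0)).sum = 0 := by
        apply List.sum_eq_zero
        intro v hv
        rcases List.mem_map.mp hv with ⟨k, hk, rfl⟩
        have : k ≠ x := fun h => hyn (h ▸ hk)
        simp [this]
      simp [hz]
    · have hyx : y ≠ x := by
        rintro rfl; exact (List.nodup_cons.mp hnd).1 hx'
      rw [ih (List.nodup_cons.mp hnd).2 hx']
      simp [hyx]

-- key lemma: summing (count in l) over a nodup superset of l's elements = countP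
theorem sum_count_eq_countP (p : String → Bool) : ∀ (l s : List String),
    s.Nodup → (∀ x, x ∈ l → x ∈ s) →
    (s.map (fun k => if p k then (l.count k : Int) else 0)).sum
      = (l.countP p : Int) := by
  intro l
  induction l with
  | nil => intro s _ _; simp
  | cons x xs ih =>
    intro s hnd hsub
    have hx : x ∈ s := hsub x List.mem_cons_self
    have hsub' : ∀ y, y ∈ xs → y ∈ s := fun y hy => hsub y (List.mem_cons_of_mem _ hy)
    have hsplit : (s.map (fun k => if p k then ((x :: xs).count k : Int) else 0)).sum
        = (s.map (fun k => if p k then (xs.count k : Int) else 0)).sum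
          + (s.map (fun k => if p k then (if k = x then (1:Int) else 0) else 0)).sum := by
      rw [← List.sum_map_add]
      apply congrArg List.sum
      apply List.map_congr_left
      intro k _
      by_cases hp : p k
      · by_cases hk : k = x
        · subst hk
          simp [hp]
        · simp [hp, hk, Ne.symm hk]
      · simp [hp]
    rw [hsplit, ih s hnd hsub', sum_single_bump p x s hnd hx, List.countP_cons]
    by_cases hp : p x <;> simp [hp]

-- ===== VERDICT =====
theorem checkWordsInList2_spec : Claim_equal_checkWordsInList2 := by
  intro list list2 _
  unfold Spec_checkWordsInList2 checkWordsInList2 checkWordsInList2_alt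
  rw [fold_pair_eq list2 list 0 0]
  simp only [PySem.Dict.foldl_insert_getD_add_one_eq_counter]
  rw [fold_if_add, PySem.Dict.items_counter]
  rw [List.map_map]
  have hmap : ((PySem.Set.ofList list).map
      ((fun p : String × Int => if list2.contains p.1 then p.2 else 0) ∘ fun k => (k, (list.count k : Int))))
      = (PySem.Set.ofList list).map (fun k => if list2.contains k then (list.count k : Int) else 0) := by
    apply List.map_congr_left; intro k _; rfl
  rw [hmap, sum_count_eq_countP (fun w => list2.contains w) list (PySem.Set.ofList list)
        (PySem.Set.nodup_ofList list) (fun x hx => (PySem.Set.mem_ofList list x).mpr hx)]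
  rw [cnt_eq_countP]
  simp
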